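-- pv_equiv track=rewrite | github.com/Maximilian55/obsidian-to-notion | obsidian_to_notion/parser.py | split_metadata_and_body
-- ===== SOURCE A (Python) =====
-- from typing import Dict, List, Optional, Tuple
--
-- def split_metadata_and_body(text: str) -> Tuple[str, str]:
--     lines = text.splitlines()
--     metadata_lines: List[str] = []
--     for idx, line in enumerate(lines):
--         if line.strip() == "---":
--             metadata = "\n".join(metadata_lines).strip("\r\n")
--             body = "\n".join(lines[idx + 1 :]).lstrip("\r\n")
--             return metadata, body
--         metadata_lines.append(line)
--     metadata = "\n".join(metadata_lines).strip("\r\n")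
--     return metadata, ""
-- ===== SOURCE B (Python) =====
-- def split_metadata_and_body(text):
--     s = text.replace("\r\n", "\n").replace("\r", "\n")
--     if s.endswith("\n"):
--         s = s[:-1]
--     before, rest = "", s
--     while True:
--         end = rest.find("\n")
--         line = rest if end == -1 else rest[:end]
--         if line.strip() == "---":
--             return before.strip("\n"), ("" if end == -1 else rest[end + 1:].lstrip("\n"))
--         if end == -1:
--             return (before + rest).strip("\n"), ""
--         before, rest = before + rest[:end + 1], rest[end + 1:]
-- ===== Notes on version B (the rewrite author's own statement) =====
-- stated objective: alternative
-- what changed: B never builds the list of lines: it normalizes line endings on the raw string with str.replace, trims one trailing newline, and scans the string itself with str.find, slicing metadata and body directly out of the normalized text; A builds splitlines() output and joins accumulated line lists back together.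
import Mathlib
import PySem

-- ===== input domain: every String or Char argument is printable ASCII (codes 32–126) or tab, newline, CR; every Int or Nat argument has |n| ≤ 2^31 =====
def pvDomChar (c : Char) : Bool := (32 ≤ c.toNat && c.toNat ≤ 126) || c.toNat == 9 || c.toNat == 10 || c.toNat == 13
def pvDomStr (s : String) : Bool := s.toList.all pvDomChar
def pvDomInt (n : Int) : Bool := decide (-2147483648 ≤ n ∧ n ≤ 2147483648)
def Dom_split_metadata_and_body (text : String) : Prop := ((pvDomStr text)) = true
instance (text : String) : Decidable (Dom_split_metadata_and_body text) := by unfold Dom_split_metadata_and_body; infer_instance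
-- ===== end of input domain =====

-- B never builds the list of lines: it normalizes line endings on the raw string and scans
-- it with find, slicing metadata and body out of the normalized text; objective: alternative.

-- ===== PORT A =====
-- s.lstrip("\r\n"): drop leading '\r'/'\n' characters (exact: Python removes any run of
-- the given characters from the left end).
def pvLstripCRLF (cs : List Char) : List Char := cs.dropWhile (fun c => c == '\r' || c == '\n')

-- "\n".join(xs).strip("\r\n") packed back into a String
def pvMeta (xs : List (List Char)) : String :=
  String.ofList (PySem.Chars.stripChars (PySem.Chars.join ['\n'] xs) ['\r', '\n'])

-- "\n".join(xs).lstrip("\r\n")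
def pvBody (xs : List (List Char)) : String :=
  String.ofList (pvLstripCRLF (PySem.Chars.join ['\n'] xs))

-- A's for-loop over enumerate(lines): the remaining tail at index idx IS lines[idx+1:].
def pvSplitLoop (rest : List (List Char)) (acc : List (List Char)) : String × String :=
  match rest with
  | [] => (pvMeta acc, "")
  | l :: rest' =>
    if PySem.Chars.strip l == "---".toList then
      (pvMeta acc, pvBody rest')
    else
      pvSplitLoop rest' (acc ++ [l])

def split_metadata_and_body (text : String) : String × String :=
  pvSplitLoop (PySem.Chars.splitlines text.toList) []

-- ===== PORT B =====
-- s.lstrip("\n"): drop leading '\n' characters (exact)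
def pvLstripNL (cs : List Char) : List Char := cs.dropWhile (fun c => c == '\n')

-- termination fact for pvScan, cited in its decreasing_by
theorem pvScanDec (rest : List Char) (h : PySem.Chars.find rest ['\n'] ≠ -1) :
    (PySem.Chars.slice rest (some (PySem.Chars.find rest ['\n'] + 1)) none).length < rest.length := by
  have h0 : 0 ≤ PySem.Chars.find rest ['\n'] := by
    have := PySem.Chars.neg_one_le_find rest ['\n']
    omega
  have hinf : ['\n'] <:+: rest := (PySem.Chars.find_nonneg_iff rest ['\n']).mp h0
  have hne : rest ≠ [] := by
    rintro rfl
    simpa using hinf.length_le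
  obtain ⟨k, hk⟩ : ∃ k : Nat, PySem.Chars.find rest ['\n'] = (k : Int) :=
    ⟨(PySem.Chars.find rest ['\n']).toNat, (Int.toNat_of_nonneg h0).symm⟩
  rw [hk]
  have : ((k : Int) + 1) = ((k + 1 : Nat) : Int) := by push_cast; ring
  rw [this]
  simp only [pysem]
  have : 0 < rest.length := List.length_pos_iff.mpr hne
  simp [List.length_drop]
  omega

-- the while-loop of Source B over state (before, rest), as tail recursion on rest (which shrinks)
def pvScan (before rest : List Char) : String × String :=
  let e := PySem.Chars.find rest ['\n']
  let line := if e = -1 then rest else PySem.Chars.slice rest none (some e)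
  if PySem.Chars.strip line == "---".toList then
    (String.ofList (PySem.Chars.stripChars before ['\n']),
     if e = -1 then "" else String.ofList (pvLstripNL (PySem.Chars.slice rest (some (e + 1)) none)))
  else if h : e = -1 then
    (String.ofList (PySem.Chars.stripChars (before ++ rest) ['\n']), "")
  else
    pvScan (before ++ PySem.Chars.slice rest none (some (e + 1))) (PySem.Chars.slice rest (some (e + 1)) none)
termination_by rest.length
decreasing_by exact pvScanDec rest h

def split_metadata_and_body_alt (text : String) : String × String :=
  let s0 := PySem.Chars.replace (PySem.Chars.replace text.toList ['\r', '\n'] ['\n']) ['\r'] ['\n']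
  let s := if PySem.Chars.endswith s0 ['\n'] then PySem.Chars.slice s0 none (some (-1)) else s0
  pvScan [] s

-- ===== PRECONDITION & SPEC =====
def Spec_split_metadata_and_body (text : String) (out : String × String) : Prop := out = split_metadata_and_body_alt text
instance (text : String) (out : String × String) : Decidable (Spec_split_metadata_and_body text out) := by unfold Spec_split_metadata_and_body; infer_instance

-- ===== CLAIM (what is proved, stated in full; the proofs are below) =====
def Claim_equal_split_metadata_and_body : Prop := ∀ (text : String), Dom_split_metadata_and_body text → Spec_split_metadata_and_body text (split_metadata_and_body text)

-- ===== LEMMAS AND PROOFS =====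

def pvNorm1 : List Char → List Char
  | [] => []
  | '\r' :: '\n' :: r => '\n' :: pvNorm1 r
  | c :: r => c :: pvNorm1 r

def pvNorm2 (s : List Char) : List Char := s.map fun c => if c = '\r' then '\n' else c

def pvSL : List Char → List (List Char)
  | [] => []
  | '\r' :: '\n' :: r => [] :: pvSL r
  | '\n' :: r => [] :: pvSL r
  | '\r' :: r => [] :: pvSL r
  | c :: r =>
    match pvSL r with
    | [] => [[c]]
    | h :: t => (c :: h) :: t

def pvMergeHead (cur : List Char) (ls : List (List Char)) : List (List Char) :=
  match ls with
  | [] => if cur.isEmpty then [] else [cur]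
  | h :: t => (cur ++ h) :: t

theorem pvMergeHead_nil (ls : List (List Char)) : pvMergeHead [] ls = ls := by
  cases ls <;> simp [pvMergeHead]

theorem pvCharToNatInj (a b : Char) (h : a.toNat = b.toNat) : a = b := by
  apply Char.ext; exact UInt32.toNat_inj.mp h

theorem pvReplaceGo1 : ∀ (fuel : Nat) (l acc : List Char), l.length ≤ fuel →
    PySem.Chars.replace.go ['\r', '\n'] ['\n'] fuel l acc = acc.reverse ++ pvNorm1 l := by
  intro fuel
  induction fuel with
  | zero =>
    intro l acc h
    have : l = [] := by cases l <;> simp_all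
    subst this
    rw [PySem.Chars.replace.go]
    simp [pvNorm1]
  | succ n ih =>
    intro l acc h
    cases l with
    | nil => rw [PySem.Chars.replace.go]; simp [pvNorm1]; omega
    | cons c t =>
      by_cases hc : c = '\r'
      · subst hc
        cases t with
        | nil =>
          rw [PySem.Chars.replace.go]
          rw [show (['\r', '\n'].isPrefixOf ['\r']) = false from by decide]
          simp only [Bool.false_eq_true, if_false]
          rw [ih [] ('\r' :: acc) (by simp)]
          simp [pvNorm1]
        | cons d t' =>
          by_cases hd : d = '\n'
          · subst hd
            rw [PySem.Chars.replace.go]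
            rw [show (['\r', '\n'].isPrefixOf ('\r' :: '\n' :: t')) = true from by simp [List.isPrefixOf]]
            simp only [if_true]
            simp only [List.length_cons, List.drop_succ_cons, List.drop_zero, List.reverse_cons,
              List.reverse_nil, List.nil_append, List.length_nil, Nat.zero_add]
            rw [List.singleton_append]
            rw [ih t' ('\n' :: acc) (by simp at h ⊢; omega)]
            simp [pvNorm1]
          · rw [PySem.Chars.replace.go]
            rw [show (['\r', '\n'].isPrefixOf ('\r' :: d :: t')) = false from by
              simp [List.isPrefixOf]; exact fun h' => hd h'.symm]
            simp only [Bool.false_eq_true, if_false]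
            rw [ih (d :: t') ('\r' :: acc) (by simp at h ⊢; omega)]
            rw [show pvNorm1 ('\r' :: d :: t') = '\r' :: pvNorm1 (d :: t') from by
              simp [pvNorm1, hd]]
            simp
      · rw [PySem.Chars.replace.go]
        rw [show (['\r', '\n'].isPrefixOf (c :: t)) = false from by
          simp [List.isPrefixOf]; exact fun hh => absurd hh.symm hc]
        simp only [Bool.false_eq_true, if_false]
        rw [ih t (c :: acc) (by simp at h ⊢; omega)]
        rw [show pvNorm1 (c :: t) = c :: pvNorm1 t from by
          cases t with
          | nil => simp [pvNorm1]
          | cons d t' => simp [pvNorm1, hc]]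
        simp

theorem pvReplaceGo2 : ∀ (fuel : Nat) (l acc : List Char), l.length ≤ fuel →
    PySem.Chars.replace.go ['\r'] ['\n'] fuel l acc = acc.reverse ++ pvNorm2 l := by
  intro fuel
  induction fuel with
  | zero =>
    intro l acc h
    have : l = [] := by cases l <;> simp_all
    subst this
    rw [PySem.Chars.replace.go]
    simp [pvNorm2]
  | succ n ih =>
    intro l acc h
    cases l with
    | nil => rw [PySem.Chars.replace.go]; simp [pvNorm2]; omega
    | cons c t =>
      by_cases hc : c = '\r'
      · subst hc
        rw [PySem.Chars.replace.go]
        rw [show (['\r'].isPrefixOf ('\r' :: t)) = true from by simp [List.isPrefixOf]]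
        simp only [if_true, List.length_nil, List.length_cons, List.drop_succ_cons, List.drop_zero,
          List.reverse_cons, List.reverse_nil, List.nil_append, List.singleton_append]
        rw [ih t ('\n' :: acc) (by simp at h ⊢; omega)]
        simp [pvNorm2]
      · rw [PySem.Chars.replace.go]
        rw [show (['\r'].isPrefixOf (c :: t)) = false from by
          simp [List.isPrefixOf]; exact fun h' => hc h'.symm]
        simp only [Bool.false_eq_true, if_false]
        rw [ih t (c :: acc) (by simp at h ⊢; omega)]
        simp [pvNorm2, hc]

theorem pvNormEq (t : List Char) :
    PySem.Chars.replace (PySem.Chars.replace t ['\r', '\n'] ['\n']) ['\r'] ['\n'] = pvNorm2 (pvNorm1 t) := by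
  rw [PySem.Chars.replace, PySem.Chars.replace]
  simp only [List.isEmpty_cons, if_false, Bool.false_eq_true]
  rw [pvReplaceGo1 t.length t [] le_rfl]
  simp only [List.reverse_nil, List.nil_append]
  rw [pvReplaceGo2 (pvNorm1 t).length (pvNorm1 t) [] le_rfl]
  simp

theorem pvSplitlinesGo (isB : Char → Bool) (hn : isB '\n' = true) (hr : isB '\r' = true)
    (hother : ∀ c, pvDomChar c = true → c ≠ '\n' → c ≠ '\r' → isB c = false) :
    ∀ (n : Nat) (t : List Char), t.length ≤ n → (∀ c ∈ t, pvDomChar c = true) →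
    ∀ (cur : List Char) (acc : List (List Char)),
    PySem.Chars.splitlines.go isB t cur acc = acc.reverse ++ pvMergeHead cur.reverse (pvSL t) := by
  intro n
  induction n with
  | zero =>
    intro t ht _ cur acc
    have : t = [] := by cases t <;> simp_all
    subst this
    rw [PySem.Chars.splitlines.go]
    by_cases hc : cur = []
    · subst hc; simp [pvMergeHead, pvSL]
    · simp only [List.isEmpty_iff, hc, if_neg, List.reverse_cons]
      simp [pvMergeHead, pvSL, hc]
  | succ n ih =>
    intro t ht hdom cur acc
    cases t with
    | nil =>
      rw [PySem.Chars.splitlines.go]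
      by_cases hc : cur = []
      · subst hc; simp [pvMergeHead, pvSL]
      · simp only [List.isEmpty_iff, hc, if_neg, List.reverse_cons]
        simp [pvMergeHead, pvSL, hc]
    | cons c t' =>
      by_cases hcr : c = '\r'
      · subst hcr
        cases t' with
        | nil =>
          -- '\r' alone: third pattern, isB '\r' = true
          rw [PySem.Chars.splitlines.go]
          simp only [hr, if_true]
          rw [ih [] (by simp) (by simp) [] (cur.reverse :: acc)]
          rw [show pvSL ['\r'] = [] :: pvSL [] from by simp [pvSL]]
          simp only [List.reverse_nil, pvMergeHead_nil]
          simp [pvMergeHead, pvSL]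
          exact fun rest _ h => by cases h
        | cons d t'' =>
          by_cases hd : d = '\n'
          · subst hd
            rw [PySem.Chars.splitlines.go]
            rw [ih t'' (by simp at ht ⊢; omega) (fun c hc => hdom c (by simp [hc])) [] (cur.reverse :: acc)]
            rw [show pvSL ('\r' :: '\n' :: t'') = [] :: pvSL t'' from by simp [pvSL]]
            simp only [List.reverse_nil, pvMergeHead_nil]
            simp [pvMergeHead]
          · rw [PySem.Chars.splitlines.go]
            simp only [hr, if_true]
            rw [ih (d :: t'') (by simp at ht ⊢; omega) (fun c hc => hdom c (by simp at hc ⊢; tauto)) [] (cur.reverse :: acc)]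
            rw [show pvSL ('\r' :: d :: t'') = [] :: pvSL (d :: t'') from by simp [pvSL, hd]]
            simp only [List.reverse_nil, pvMergeHead_nil]
            simp [pvMergeHead]
            exact fun rest _ h => by injection h with h1 _; exact hd h1
      · by_cases hnl : c = '\n'
        · subst hnl
          rw [PySem.Chars.splitlines.go]
          simp only [hn, if_true]
          rw [ih t' (by simp at ht ⊢; omega) (fun c hc => hdom c (by simp [hc])) [] (cur.reverse :: acc)]
          rw [show pvSL ('\n' :: t') = [] :: pvSL t' from by simp [pvSL]]
          simp only [List.reverse_nil, pvMergeHead_nil]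
          simp [pvMergeHead]
          exact fun rest h _ => hcr h
        · rw [PySem.Chars.splitlines.go]
          have hB : isB c = false := hother c (hdom c (by simp)) hnl hcr
          simp only [hB, Bool.false_eq_true, if_false]
          rw [ih t' (by simp at ht ⊢; omega) (fun x hx => hdom x (by simp [hx])) (c :: cur) acc]
          rw [show pvSL (c :: t') = (match pvSL t' with | [] => [[c]] | h :: t => (c :: h) :: t) from by
            cases t' with
            | nil => simp [pvSL, hcr, hnl]
            | cons e t'' => simp [pvSL, hcr, hnl]]
          · cases hsl : pvSL t' with
            | nil => simp [pvMergeHead]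
            | cons h tl => simp [pvMergeHead]
          · exact fun rest h _ => hcr h

theorem pvSplitlinesEq (t : List Char) (hd : ∀ c ∈ t, pvDomChar c = true) :
    PySem.Chars.splitlines t = pvSL t := by
  rw [PySem.Chars.splitlines]
  rw [pvSplitlinesGo _ (by decide) (by decide) ?_ t.length t le_rfl hd [] []]
  · simp [pvMergeHead_nil]
  · intro c h1 h2 h3
    have e10 : c.toNat ≠ 10 := fun hh => h2 (pvCharToNatInj c '\n' hh)
    have e13 : c.toNat ≠ 13 := fun hh => h3 (pvCharToNatInj c '\r' hh)
    simp only [pvDomChar, Bool.or_eq_true, Bool.and_eq_true, decide_eq_true_eq, beq_iff_eq] at h1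
    simp only [Bool.or_eq_false_iff, decide_eq_false_iff_not]
    omega

theorem pvSL_no_break : ∀ (t : List Char), ∀ l ∈ pvSL t, ∀ c ∈ l, c ≠ '\n' ∧ c ≠ '\r' := by
  intro t
  induction t using pvSL.induct with
  | case1 => simp [pvSL]
  | case2 r ih => simpa [pvSL] using ih
  | case3 r ih => simpa [pvSL] using ih
  | case4 r h1 ih =>
    rw [show pvSL ('\r' :: r) = [] :: pvSL r from by
      cases r with
      | nil => rfl
      | cons d r' =>
        have hd : d ≠ '\n' := fun hh => h1 r' (by rw [hh])
        simp [pvSL, hd]]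
    simpa using ih
  | case5 c r h1 h2 h3 hsl ih =>
    rw [show pvSL (c :: r) = [[c]] from by simp [pvSL, h2, h3, hsl]]
    simp
    exact ⟨h2, h3⟩
  | case6 c r h1 h2 h3 h t hsl ih =>
    rw [show pvSL (c :: r) = (c :: h) :: t from by simp [pvSL, h2, h3, hsl]]
    intro l hl d hd
    rcases List.mem_cons.mp hl with rfl | hl
    · rcases List.mem_cons.mp hd with rfl | hd
      · exact ⟨fun hh => h2 hh, fun hh => h3 hh⟩
      · exact ih h (by rw [hsl]; simp) d hd
    · exact ih l (by rw [hsl]; simp [hl]) d hd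

theorem pvSL_nil_iff (t : List Char) : pvSL t = [] ↔ t = [] := by
  cases t with
  | nil => simp [pvSL]
  | cons c r =>
    simp only [iff_false, reduceCtorEq]
    show pvSL (c :: r) ≠ []
    by_cases hc : c = '\r'
    · subst hc
      cases r with
      | nil => simp [pvSL]
      | cons d r' =>
        by_cases hd : d = '\n' <;> simp [pvSL, hd]
    · by_cases hn : c = '\n'
      · subst hn; simp [pvSL]
      · cases hsl : pvSL r <;> simp [pvSL, hc, hn, hsl]

theorem pvNorm_nil_iff (t : List Char) : pvNorm2 (pvNorm1 t) = [] ↔ t = [] := by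
  cases t with
  | nil => simp [pvNorm1, pvNorm2]
  | cons c r =>
    constructor
    · intro h
      exfalso
      have : pvNorm1 (c :: r) = [] := by simpa [pvNorm2] using h
      revert this
      cases r with
      | nil => simp [pvNorm1]
      | cons d r' =>
        by_cases hc : c = '\r' <;> by_cases hd : d = '\n' <;> simp [pvNorm1, hc, hd]
    · intro h; cases h

def pvDropT (s : List Char) : List Char :=
  if PySem.Chars.endswith s ['\n'] then s.dropLast else s

theorem pvEndswith_cons (c : Char) (x : List Char) (hx : x ≠ []) :
    PySem.Chars.endswith (c :: x) ['\n'] = PySem.Chars.endswith x ['\n'] := by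
  rcases Bool.eq_false_or_eq_true (PySem.Chars.endswith x ['\n']) with h | h
  · rw [h]
    rw [PySem.Chars.endswith_iff] at h ⊢
    exact h.trans (List.suffix_cons c x)
  · rw [h]
    rw [Bool.eq_false_iff] at h ⊢
    intro hc
    apply h
    rw [PySem.Chars.endswith_iff] at hc ⊢
    rcases (List.suffix_cons_iff.mp hc) with h1 | h1
    · exfalso
      injection h1 with _ h2
      exact hx h2.symm
    · exact h1

theorem pvDropT_cons (c : Char) (x : List Char) (hx : x ≠ []) :
    pvDropT (c :: x) = c :: pvDropT x := by
  unfold pvDropT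
  rw [pvEndswith_cons c x hx]
  split
  · rw [List.dropLast_cons_of_ne_nil hx]
  · rfl

theorem pvJoin_consHead (c : Char) (ls : List (List Char)) :
    PySem.Chars.join ['\n'] (match ls with | [] => [[c]] | h :: t => (c :: h) :: t)
      = c :: PySem.Chars.join ['\n'] ls := by
  match ls with
  | [] => simp [PySem.Chars.join_singleton, PySem.Chars.join_nil]
  | [h] => simp [PySem.Chars.join_singleton]
  | h :: h2 :: t => rw [PySem.Chars.join_cons_cons, PySem.Chars.join_cons_cons]; simp

theorem pvJoin_nilHead (ls : List (List Char)) (h : ls ≠ []) :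
    PySem.Chars.join ['\n'] ([] :: ls) = '\n' :: PySem.Chars.join ['\n'] ls := by
  match ls with
  | [] => exact absurd rfl h
  | h2 :: t => rw [PySem.Chars.join_cons_cons]; simp

theorem pvKey1 : ∀ (t : List Char),
    pvDropT (pvNorm2 (pvNorm1 t)) = PySem.Chars.join ['\n'] (pvSL t) := by
  intro t
  induction t using pvSL.induct with
  | case1 => simp [pvNorm1, pvNorm2, pvDropT, PySem.Chars.endswith, PySem.Chars.join_nil, pvSL]
  | case2 r ih =>
    rw [show pvNorm1 ('\r' :: '\n' :: r) = '\n' :: pvNorm1 r from by simp [pvNorm1],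
        show pvSL ('\r' :: '\n' :: r) = [] :: pvSL r from by simp [pvSL]]
    by_cases hr : r = []
    · subst hr
      simp [pvNorm1, pvNorm2, pvDropT, PySem.Chars.endswith, pvSL, PySem.Chars.join_singleton]
    · rw [show pvNorm2 ('\n' :: pvNorm1 r) = '\n' :: pvNorm2 (pvNorm1 r) from by simp [pvNorm2]]
      rw [pvDropT_cons _ _ (by rw [ne_eq, pvNorm_nil_iff]; exact hr), ih,
          pvJoin_nilHead _ (by rw [ne_eq, pvSL_nil_iff]; exact hr)]
  | case3 r ih =>
    rw [show pvNorm1 ('\n' :: r) = '\n' :: pvNorm1 r from by simp [pvNorm1],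
        show pvSL ('\n' :: r) = [] :: pvSL r from by simp [pvSL]]
    by_cases hr : r = []
    · subst hr
      simp [pvNorm1, pvNorm2, pvDropT, PySem.Chars.endswith, pvSL, PySem.Chars.join_singleton]
    · rw [show pvNorm2 ('\n' :: pvNorm1 r) = '\n' :: pvNorm2 (pvNorm1 r) from by simp [pvNorm2]]
      rw [pvDropT_cons _ _ (by rw [ne_eq, pvNorm_nil_iff]; exact hr), ih,
          pvJoin_nilHead _ (by rw [ne_eq, pvSL_nil_iff]; exact hr)]
  | case4 r h1 ih =>
    have hnr : pvNorm1 ('\r' :: r) = '\r' :: pvNorm1 r := by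
      cases r with
      | nil => rfl
      | cons d r' =>
        have hd : d ≠ '\n' := fun hh => h1 r' (by rw [hh])
        simp [pvNorm1, hd]
    have hsl : pvSL ('\r' :: r) = [] :: pvSL r := by
      cases r with
      | nil => rfl
      | cons d r' =>
        have hd : d ≠ '\n' := fun hh => h1 r' (by rw [hh])
        simp [pvSL, hd]
    rw [hnr, hsl]
    by_cases hr : r = []
    · subst hr
      simp [pvNorm1, pvNorm2, pvDropT, PySem.Chars.endswith, pvSL, PySem.Chars.join_singleton]
    · rw [show pvNorm2 ('\r' :: pvNorm1 r) = '\n' :: pvNorm2 (pvNorm1 r) from by simp [pvNorm2]]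
      rw [pvDropT_cons _ _ (by rw [ne_eq, pvNorm_nil_iff]; exact hr), ih,
          pvJoin_nilHead _ (by rw [ne_eq, pvSL_nil_iff]; exact hr)]
  | case5 c r h1 h2 h3 hsl ih =>
    have hr : r = [] := (pvSL_nil_iff r).mp hsl
    subst hr
    have hc : c ≠ '\r' := fun hh => h3 hh
    have hcn : c ≠ '\n' := fun hh => h2 hh
    rw [show pvNorm1 [c] = [c] from by simp [pvNorm1]]
    rw [show pvSL [c] = [[c]] from by simp [pvSL, h2, h3]]
    simp [pvNorm2, hc, pvDropT, PySem.Chars.endswith, hcn, PySem.Chars.join_singleton,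
      List.isSuffixOf]
    exact fun hh => hcn hh.symm
  | case6 c r h1 h2 h3 h t hsl ih =>
    have hrne : r ≠ [] := fun hh => by subst hh; rw [show pvSL ([] : List Char) = [] from rfl] at hsl; cases hsl
    have hc : c ≠ '\r' := fun hh => h3 hh
    have hcn : c ≠ '\n' := fun hh => h2 hh
    have hn1 : pvNorm1 (c :: r) = c :: pvNorm1 r := by
      cases r with
      | nil => exact absurd rfl hrne
      | cons d r' => simp [pvNorm1, hc]
    rw [hn1]
    rw [show pvSL (c :: r) = (c :: h) :: t from by simp [pvSL, h2, h3, hsl]]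
    rw [show pvNorm2 (c :: pvNorm1 r) = c :: pvNorm2 (pvNorm1 r) from by simp [pvNorm2, hc]]
    rw [pvDropT_cons _ _ (by rw [ne_eq, pvNorm_nil_iff]; exact hrne), ih, hsl]
    exact (pvJoin_consHead c (h :: t)).symm

theorem pvDropWhileCongr {p q : Char → Bool} : ∀ (l : List Char), (∀ c ∈ l, p c = q c) →
    l.dropWhile p = l.dropWhile q := by
  intro l
  induction l with
  | nil => intro _; rfl
  | cons c t ih =>
    intro h
    simp only [List.dropWhile_cons]
    rw [h c (by simp)]
    split
    · exact ih fun x hx => h x (by simp [hx])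
    · rfl

theorem pvMemJoin : ∀ (L : List (List Char)) (c : Char), c ∈ PySem.Chars.join ['\n'] L →
    c = '\n' ∨ ∃ l ∈ L, c ∈ l := by
  intro L
  induction L with
  | nil => intro c h; rw [PySem.Chars.join_nil] at h; cases h
  | cons x t ih =>
    intro c h
    cases t with
    | nil =>
      rw [PySem.Chars.join_singleton] at h
      exact Or.inr ⟨x, by simp, h⟩
    | cons y t' =>
      rw [PySem.Chars.join_cons_cons] at h
      simp only [List.mem_append] at h
      rcases h with (h | h) | h
      · exact Or.inr ⟨x, by simp, h⟩
      · left; simpa using h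
      · rcases ih c h with h' | ⟨l, hl, hcl⟩
        · exact Or.inl h'
        · exact Or.inr ⟨l, by simp [List.mem_cons.mp hl], hcl⟩

theorem pvStripCharsNoCR (x : List Char) (h : '\r' ∉ x) :
    PySem.Chars.stripChars x ['\r', '\n'] = PySem.Chars.stripChars x ['\n'] := by
  rw [PySem.Chars.stripChars, PySem.Chars.stripChars]
  have hcongr : ∀ (y : List Char), (∀ c ∈ y, c ≠ '\r') →
      y.dropWhile (fun c => ['\r', '\n'].contains c) = y.dropWhile (fun c => ['\n'].contains c) := by
    intro y hy
    apply pvDropWhileCongr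
    intro c hc
    have := hy c hc
    simp [List.contains_eq_mem, this]
  rw [hcongr x (fun c hc hh => h (hh ▸ hc))]
  apply congrArg
  apply hcongr
  intro c hc
  intro hh
  subst hh
  have h1 : '\r' ∈ x.dropWhile (fun c => ['\n'].contains c) := List.mem_reverse.mp hc
  exact h (List.dropWhile_sublist _ |>.mem h1)

theorem pvStripCharsAppendNL (x : List Char) :
    PySem.Chars.stripChars (x ++ ['\n']) ['\n'] = PySem.Chars.stripChars x ['\n'] := by
  rw [PySem.Chars.stripChars, PySem.Chars.stripChars]
  have hpn : (fun c => (['\n'] : List Char).contains c) '\n' = true := by simp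
  rw [List.dropWhile_append]
  by_cases hE : List.dropWhile (fun c => (['\n'] : List Char).contains c) x = []
  · rw [hE]
    simp only [List.isEmpty_nil, if_true]
    rw [show List.dropWhile (fun c => (['\n'] : List Char).contains c) ['\n'] = [] from by
      rw [List.dropWhile_cons]; simp]
  · have hE' : (List.dropWhile (fun c => (['\n'] : List Char).contains c) x).isEmpty = false := by
      simpa using hE
    rw [hE']
    simp only [Bool.false_eq_true, if_false]
    rw [List.reverse_append]
    simp only [List.reverse_cons, List.reverse_nil, List.nil_append, List.singleton_append]
    rw [List.dropWhile_cons]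
    simp

theorem pvFindNoNL (l : List Char) (h : '\n' ∉ l) : PySem.Chars.find l ['\n'] = -1 := by
  rw [PySem.Chars.find_eq_neg_one_iff]
  intro hinf
  exact h (hinf.mem (by simp))

theorem pvFindAppend (l z : List Char) (h : '\n' ∉ l) :
    PySem.Chars.find (l ++ '\n' :: z) ['\n'] = (l.length : Int) := by
  have hinf : ['\n'] <:+: (l ++ '\n' :: z) := by
    refine ⟨l, z, by simp⟩
  have h0 : 0 ≤ PySem.Chars.find (l ++ '\n' :: z) ['\n'] :=
    (PySem.Chars.find_nonneg_iff _ _).mpr hinf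
  obtain ⟨hpre, hmin⟩ := PySem.Chars.find_spec h0
  set k := (PySem.Chars.find (l ++ '\n' :: z) ['\n']).toNat with hk
  have hle : k ≤ l.length := by
    by_contra hgt
    push_neg at hgt
    exact hmin l.length hgt (by simp [List.drop_append_of_le_length, List.drop_length])
  have hge : ¬ k < l.length := by
    intro hlt
    have hdrop : List.drop k (l ++ '\n' :: z) = List.drop k l ++ '\n' :: z := by
      rw [List.drop_append_of_le_length (le_of_lt hlt)]
    rw [hdrop] at hpre
    obtain ⟨w, hw⟩ := hpre
    have hne : List.drop k l ≠ [] := by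
      intro hnil
      rw [List.drop_eq_nil_iff] at hnil
      omega
    obtain ⟨a, as, ha⟩ := List.exists_cons_of_ne_nil hne
    rw [ha] at hw
    simp only [List.singleton_append, List.cons_append] at hw
    injection hw with h1 _
    subst h1
    apply h
    have : '\n' ∈ List.drop k l := by rw [ha]; simp
    exact (List.drop_sublist k l).mem this
  have : k = l.length := by omega
  rw [← Int.toNat_of_nonneg h0, ← hk, this]

theorem pvJoinAppend (acc : List (List Char)) (l : List Char) (h : acc ≠ []) :
    PySem.Chars.join ['\n'] (acc ++ [l]) = PySem.Chars.join ['\n'] acc ++ '\n' :: l := by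
  induction acc with
  | nil => exact absurd rfl h
  | cons x t ih =>
    cases t with
    | nil =>
      show PySem.Chars.join ['\n'] [x, l] = PySem.Chars.join ['\n'] [x] ++ '\n' :: l
      rw [PySem.Chars.join_cons_cons, PySem.Chars.join_singleton, PySem.Chars.join_singleton]
      simp
    | cons y t' =>
      have h1 : (x :: y :: t') ++ [l] = x :: ((y :: t') ++ [l]) := by simp
      have h2 : (y :: t') ++ [l] = y :: (t' ++ [l]) := by simp
      rw [h1, h2, PySem.Chars.join_cons_cons, ← h2, ih (by simp), PySem.Chars.join_cons_cons]
      simp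

-- no-'\r' of a join

theorem pvJoinNoCR (L : List (List Char)) (hL : ∀ l ∈ L, ∀ c ∈ l, c ≠ '\r') :
    '\r' ∉ PySem.Chars.join ['\n'] L := by
  intro hmem
  rcases pvMemJoin L '\r' hmem with h | ⟨l, hl, hcl⟩
  · exact absurd h (by decide)
  · exact hL l hl '\r' hcl rfl

-- shared meta equality

theorem pvMetaEq (acc : List (List Char)) (before : List Char)
    (hacc : ∀ l ∈ acc, ∀ c ∈ l, c ≠ '\n' ∧ c ≠ '\r')
    (hinv : before = [] ∧ acc = [] ∨ acc ≠ [] ∧ before = PySem.Chars.join ['\n'] acc ++ ['\n']) :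
    PySem.Chars.stripChars before ['\n']
      = PySem.Chars.stripChars (PySem.Chars.join ['\n'] acc) ['\r', '\n'] := by
  rcases hinv with ⟨hb, ha⟩ | ⟨ha, hb⟩
  · subst hb; subst ha; rfl
  · subst hb
    rw [pvStripCharsAppendNL]
    rw [pvStripCharsNoCR _ (pvJoinNoCR acc (fun l hl c hc => (hacc l hl c hc).2))]

theorem pvKey2 : ∀ (L : List (List Char)), (∀ l ∈ L, ∀ c ∈ l, c ≠ '\n' ∧ c ≠ '\r') →
    ∀ (acc : List (List Char)) (before : List Char),
    (∀ l ∈ acc, ∀ c ∈ l, c ≠ '\n' ∧ c ≠ '\r') →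
    (before = [] ∧ acc = [] ∨ acc ≠ [] ∧ before = PySem.Chars.join ['\n'] acc ++ ['\n']) →
    pvScan before (PySem.Chars.join ['\n'] L) = pvSplitLoop L acc := by
  intro L
  induction L with
  | nil =>
    intro _ acc before hacc hinv
    rw [PySem.Chars.join_nil, pvScan]
    rw [show PySem.Chars.find ([] : List Char) ['\n'] = -1 from by decide]
    simp only [reduceIte]
    rw [show (PySem.Chars.strip [] == "---".toList) = false from by decide]
    simp only [Bool.false_eq_true, if_false]
    rw [pvSplitLoop, pvMeta]
    rw [List.append_nil]
    rw [pvMetaEq acc before hacc hinv]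
    simp
  | cons l L' ih =>
    intro hL acc before hacc hinv
    have hl := hL l (by simp)
    have hlnl : '\n' ∉ l := fun hc => (hl _ hc).1 rfl
    have hlcr : '\r' ∉ l := fun hc => (hl _ hc).2 rfl
    have hL' : ∀ m ∈ L', ∀ c ∈ m, c ≠ '\n' ∧ c ≠ '\r' := fun m hm => hL m (by simp [hm])
    cases L' with
    | nil =>
      rw [PySem.Chars.join_singleton, pvScan]
      rw [pvFindNoNL l hlnl]
      simp only [reduceIte]
      rw [pvSplitLoop]
      by_cases hdelim : (PySem.Chars.strip l == "---".toList) = true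
      · rw [if_pos hdelim, if_pos hdelim]
        rw [pvMetaEq acc before hacc hinv]
        rfl
      · rw [if_neg hdelim, if_neg hdelim]
        rw [dif_pos trivial]
        rw [pvSplitLoop, pvMeta]
        have hmeta : PySem.Chars.stripChars (before ++ l) ['\n']
            = PySem.Chars.stripChars (PySem.Chars.join ['\n'] (acc ++ [l])) ['\r', '\n'] := by
          rcases hinv with ⟨hb, ha⟩ | ⟨ha, hb⟩
          · subst hb; subst ha
            rw [List.nil_append, List.nil_append, PySem.Chars.join_singleton]
            rw [pvStripCharsNoCR _ (by intro hc; exact hlcr hc)]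
          · subst hb
            rw [pvJoinAppend acc l ha]
            have hnoCR : '\r' ∉ PySem.Chars.join ['\n'] acc ++ '\n' :: l := by
              intro hc
              rcases List.mem_append.mp hc with hc | hc
              · exact pvJoinNoCR acc (fun m hm c hcm => (hacc m hm c hcm).2) hc
              · rcases List.mem_cons.mp hc with hc | hc
                · exact absurd hc (by decide)
                · exact hlcr hc
            rw [pvStripCharsNoCR _ hnoCR]
            congr 1
            simp
        rw [hmeta]
    | cons m L'' =>
      rw [PySem.Chars.join_cons_cons]
      have hrest : l ++ ['\n'] ++ PySem.Chars.join ['\n'] (m :: L'')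
          = l ++ '\n' :: PySem.Chars.join ['\n'] (m :: L'') := by simp
      rw [hrest, pvScan]
      rw [pvFindAppend l _ hlnl]
      have hne : ((l.length : Int)) = -1 ↔ False := ⟨fun hh => by omega, False.elim⟩
      simp only [hne, if_false, dite_eq_ite]
      have hline : PySem.Chars.slice (l ++ '\n' :: PySem.Chars.join ['\n'] (m :: L'')) none
          (some (l.length : Int)) = l := by
        simp only [pysem]
        exact List.take_left
      have hdrop : PySem.Chars.slice (l ++ '\n' :: PySem.Chars.join ['\n'] (m :: L''))
          (some ((l.length : Int) + 1)) none = PySem.Chars.join ['\n'] (m :: L'') := by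
        rw [show ((l.length : Int) + 1) = ((l.length + 1 : Nat) : Int) from by push_cast; ring]
        simp only [pysem]
        rw [show l.length + 1 = (l ++ ['\n']).length from by simp]
        rw [show l ++ '\n' :: PySem.Chars.join ['\n'] (m :: L'') = (l ++ ['\n']) ++ PySem.Chars.join ['\n'] (m :: L'') from by simp]
        exact List.drop_left
      rw [hline, hdrop]
      rw [pvSplitLoop]
      by_cases hdelim : (PySem.Chars.strip l == "---".toList) = true
      · rw [if_pos hdelim, if_pos hdelim]
        rw [pvMetaEq acc before hacc hinv]
        rw [pvMeta, pvBody]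
        have hbody : pvLstripNL (PySem.Chars.join ['\n'] (m :: L''))
            = pvLstripCRLF (PySem.Chars.join ['\n'] (m :: L'')) := by
          rw [pvLstripNL, pvLstripCRLF]
          apply pvDropWhileCongr
          intro c hc
          have : c ≠ '\r' := by
            intro hh
            subst hh
            exact pvJoinNoCR (m :: L'') (fun x hx d hd => (hL' x hx d hd).2) hc
          simp [this]
        rw [hbody]
      · rw [if_neg hdelim, if_neg hdelim]
        have hinv' : before ++ (l ++ ['\n']) = [] ∧ acc ++ [l] = [] ∨ acc ++ [l] ≠ [] ∧
            before ++ (l ++ ['\n']) = PySem.Chars.join ['\n'] (acc ++ [l]) ++ ['\n'] := by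
          right
          constructor
          · simp
          · rcases hinv with ⟨hb, ha⟩ | ⟨ha, hb⟩
            · subst hb; subst ha
              rw [List.nil_append, List.nil_append, PySem.Chars.join_singleton]
            · subst hb
              rw [pvJoinAppend acc l ha]
              simp
        have hacc' : ∀ x ∈ acc ++ [l], ∀ c ∈ x, c ≠ '\n' ∧ c ≠ '\r' := by
          intro x hx
          rcases List.mem_append.mp hx with hx | hx
          · exact hacc x hx
          · rcases List.mem_singleton.mp hx with rfl
            exact hl
        have := ih hL' (acc ++ [l]) (before ++ (l ++ ['\n'])) hacc' hinv'
        rw [← this]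
        congr 1
        rw [show ((l.length : Int) + 1) = ((l.length + 1 : Nat) : Int) from by push_cast; ring]
        simp only [pysem]
        rw [show l ++ '\n' :: PySem.Chars.join ['\n'] (m :: L'') = (l ++ ['\n']) ++ PySem.Chars.join ['\n'] (m :: L'') from by simp]
        rw [show l.length + 1 = (l ++ ['\n']).length from by simp]
        rw [List.take_left]

-- ===== VERDICT (by name: the statement is the Claim_ definition above) =====
theorem split_metadata_and_body_spec : Claim_equal_split_metadata_and_body := by
  intro text hd
  have hdl : ∀ c ∈ text.toList, pvDomChar c = true := by
    intro c hc
    unfold Dom_split_metadata_and_body pvDomStr at hd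
    exact List.all_eq_true.mp hd c hc
  unfold Spec_split_metadata_and_body split_metadata_and_body split_metadata_and_body_alt
  rw [pvSplitlinesEq text.toList hdl]
  rw [pvNormEq]
  have hslice : (if PySem.Chars.endswith (pvNorm2 (pvNorm1 text.toList)) ['\n']
      then PySem.Chars.slice (pvNorm2 (pvNorm1 text.toList)) none (some (-1))
      else pvNorm2 (pvNorm1 text.toList)) = PySem.Chars.join ['\n'] (pvSL text.toList) := by
    rw [← pvKey1 text.toList, pvDropT]
    by_cases h : PySem.Chars.endswith (pvNorm2 (pvNorm1 text.toList)) ['\n'] = true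
    · rw [if_pos h, if_pos h]
      simp [pysem]
    · rw [if_neg h, if_neg h]
  show pvSplitLoop (pvSL text.toList) [] =
    pvScan [] (if PySem.Chars.endswith (pvNorm2 (pvNorm1 text.toList)) ['\n']
      then PySem.Chars.slice (pvNorm2 (pvNorm1 text.toList)) none (some (-1))
      else pvNorm2 (pvNorm1 text.toList))
  rw [hslice]
  exact (pvKey2 (pvSL text.toList) (pvSL_no_break text.toList) [] [] (by simp) (Or.inl ⟨rfl, rfl⟩)).symm
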